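-- pv_equiv track=rewrite | github.com/gaurangkeluskar22/HacktoberFest-2020 | Python/hill.py | kMtrx
-- ===== SOURCE A (Python) =====
-- def check(i):
--     n=int(0)
--     if i.isupper():
--         v=ord(i)-65
--         n=65
--     elif i.islower():
--         v=ord(i)-97
--         n=97
--     else:
--         v=int(i)
--     return v,n
--
-- def kMtrx(k,l):
--     mtrx=[]
--     for i in range(len(k)):
--         v,n=check(k[i])
--         if i%l==0:
--             t=[]
--             mtrx.append(t)
--         t.append(v)
--     return mtrx
-- ===== SOURCE B (Python) =====
-- def conv(c):
--     if c.isupper():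
--         return ord(c) - 65
--     if c.islower():
--         return ord(c) - 97
--     return int(c)
--
-- def kMtrx(k, l):
--     return [[conv(c) for c in k[i:i+l]] for i in range(0, len(k), l)]
-- ===== Notes on version B (the rewrite author's own statement) =====
-- stated objective: idiomatic
-- what changed: B builds each row by stepping through the string in slices of length l (range(0, len(k), l) with a per-slice comprehension), replacing A's flat indexed loop that tests i % l to open a new row and mutates the last row in place; Pre_ restricts to the natural domain of row lengths l >= 1 (l = 0 raises ZeroDivisionError in A on nonempty input, and for l < 0 A's i % l test accidentally chunks by |l|; the empty string is still admitted for any nonzero l) and to alphanumeric characters (int(c) raises ValueError otherwise). …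
-- outside the precondition, e.g. on kMtrx('ab', -2): A returns [[0, 1]], B returns []; on kMtrx('', 0): A returns [], B raises ValueError
import Mathlib
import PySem

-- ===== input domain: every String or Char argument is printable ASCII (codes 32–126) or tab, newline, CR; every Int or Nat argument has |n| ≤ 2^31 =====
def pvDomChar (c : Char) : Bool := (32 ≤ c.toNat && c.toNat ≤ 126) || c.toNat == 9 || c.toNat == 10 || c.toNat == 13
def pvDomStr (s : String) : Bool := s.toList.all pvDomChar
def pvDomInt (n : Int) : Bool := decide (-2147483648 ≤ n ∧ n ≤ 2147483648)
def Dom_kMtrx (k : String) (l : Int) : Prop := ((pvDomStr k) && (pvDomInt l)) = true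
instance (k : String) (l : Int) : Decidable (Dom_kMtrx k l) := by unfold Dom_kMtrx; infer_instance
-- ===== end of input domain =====

-- B builds the matrix by slicing the string into chunks of length l (range with step l) instead of
-- A's flat indexed loop that tests i % l to open a new row; idiomatic decomposition, same cost.

-- ===== PORT A =====
-- check(i) of Source A, at the single-character level (Python calls it on k[i]).
def pvCheckA (c : Char) : Int × Int :=
  if PySem.Chars.isupper c then (((c.toNat : Int) - 65), 65)
  else if PySem.Chars.islower c then (((c.toNat : Int) - 97), 97)
  else ((PySem.Int.ofChars? [c]).getD 0, 0)   -- int(i); none (ValueError) excluded by Pre_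

-- A's loop: `t` is appended into mtrx by reference and then mutated; modelled as
-- (finished rows, current row), with the current row appended at the end.
def kMtrx (k : String) (l : Int) : List (List Int) :=
  let cs := k.toList
  let st := (PySem.List.pyRange 0 (PySem.Str.len k) 1).foldl
    (fun (st : List (List Int) × Option (List Int)) i =>
      let v := (pvCheckA (PySem.List.pyGetD cs i ' ')).1
      if PySem.Int.mod i l = 0 then
        (st.1 ++ (match st.2 with | none => [] | some t => [t]), some [v])
      else
        (st.1, st.2.map (fun t => t ++ [v])))
    ([], none)
  st.1 ++ (match st.2 with | none => [] | some t => [t])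

-- ===== PORT B =====
-- conv of Source B
def pvConvB (c : Char) : Int :=
  if PySem.Chars.isupper c then (c.toNat : Int) - 65
  else if PySem.Chars.islower c then (c.toNat : Int) - 97
  else (PySem.Int.ofChars? [c]).getD 0   -- int(c); none (ValueError) excluded by Pre_

def kMtrx_alt (k : String) (l : Int) : List (List Int) :=
  (PySem.List.pyRange 0 (PySem.Str.len k) l).map
    (fun i => (PySem.List.slice k.toList (some i) (some (i + l))).map pvConvB)

-- ===== PRECONDITION & SPEC =====
-- Pre_ restricts to the natural domain of row lengths and characters: alphanumeric characters only
-- (int(c) raises ValueError on anything else), and l ≥ 1 (l = 0 raises ZeroDivisionError in A on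
-- nonempty k, and for l < 0 A's i % l test accidentally chunks by |l|) — except that the empty
-- string is admitted for any nonzero l, where both trivially return [].
def Pre_kMtrx (k : String) (l : Int) : Prop :=
  (k.toList.all PySem.Chars.isalnum = true) ∧ (1 ≤ l ∨ (k.toList = [] ∧ l ≠ 0))
instance (k : String) (l : Int) : Decidable (Pre_kMtrx k l) := by unfold Pre_kMtrx; infer_instance
def pvWitness_kMtrx : String × Int := ("ab", 2)

def Spec_kMtrx (k : String) (l : Int) (out : List (List Int)) : Prop := out = kMtrx_alt k l
instance (k : String) (l : Int) (out : List (List Int)) : Decidable (Spec_kMtrx k l out) := by unfold Spec_kMtrx; infer_instance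

-- ===== CLAIM (what is proved, stated in full; the proofs are below) =====
def Claim_equal_kMtrx : Prop := ∀ (k : String) (l : Int), Dom_kMtrx k l → Pre_kMtrx k l → Spec_kMtrx k l (kMtrx k l)

-- ===== LEMMAS AND PROOFS =====

-- the per-character value both programs compute
def pvV (c : Char) : Int := (pvCheckA c).1

theorem pvConvB_eq (c : Char) : pvConvB c = pvV c := by
  simp only [pvConvB, pvV, pvCheckA]; split_ifs <;> rfl

-- chunks m vs: vs cut into consecutive pieces of length m (m ≥ 1 intended)
def pvChunks (m : Nat) : List Int → List (List Int)
  | [] => []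
  | v :: vs => (v :: vs.take (m-1)) :: pvChunks m (vs.drop (m-1))
  termination_by vs => vs.length
  decreasing_by simp

@[simp] theorem pvChunks_nil (m : Nat) : pvChunks m [] = [] := by rw [pvChunks.eq_def]

theorem pvChunks_cons (m : Nat) (hm : 0 < m) (vs : List Int) (h : vs ≠ []) :
    pvChunks m vs = vs.take m :: pvChunks m (vs.drop m) := by
  obtain ⟨v, vs, rfl⟩ := List.exists_cons_of_ne_nil h
  rw [pvChunks.eq_def]
  obtain ⟨m, rfl⟩ := Nat.exists_eq_succ_of_ne_zero (Nat.pos_iff_ne_zero.mp hm)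
  simp

theorem pvChunks_short (m : Nat) (hm : 0 < m) (vs : List Int) (h : vs ≠ []) (hlen : vs.length ≤ m) :
    pvChunks m vs = [vs] := by
  rw [pvChunks_cons m hm vs h, List.take_of_length_le hlen, List.drop_of_length_le hlen, pvChunks_nil]

-- cons form of pyRange for a positive step
theorem pvPyRange_pos_cons (a b st : Int) (h : a < b) (hst : 0 < st) :
    PySem.List.pyRange a b st = a :: PySem.List.pyRange (a + st) b st := by
  rw [PySem.List.pyRange_of_pos _ _ hst, PySem.List.pyRange_of_pos _ _ hst]
  have hcnt : ((b - a + st - 1) / st).toNat = ((b - (a + st) + st - 1) / st).toNat + 1 := by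
    have : b - a + st - 1 = (b - (a + st) + st - 1) + 1 * st := by ring
    rw [this, Int.add_mul_ediv_right _ _ (by omega)]
    have h0 : 0 ≤ b - (a + st) + st - 1 := by omega
    have := Int.ediv_nonneg h0 (le_of_lt hst)
    omega
  simp only [if_pos h, hcnt]
  by_cases h2 : a + st < b
  · simp only [if_pos h2, List.range_succ_eq_map, List.map_cons, List.map_map]
    congr 1
    · simp
    · apply List.map_congr_left; intro k _; simp; ring
  · have : ((b - (a + st) + st - 1) / st).toNat = 0 := by
      have : (b - (a + st) + st - 1) / st ≤ 0 := by
        by_contra hc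
        push Not at hc
        have := (Int.le_ediv_iff_mul_le hst).mp hc
        omega
      omega
    simp [this]

theorem pvPyRange_pos_nil (a b st : Int) (h : b ≤ a) (hst : 0 < st) :
    PySem.List.pyRange a b st = [] := by
  rw [PySem.List.pyRange_of_pos _ _ hst, if_neg (by omega)]; simp

-- indices s..s+r read through getD are the sublist
theorem pvMapGetD (cs : List Char) : ∀ (r s : Nat), s + r ≤ cs.length →
    (List.range' s r).map (fun j => cs.getD j ' ') = (cs.drop s).take r := by
  intro r
  induction r with
  | zero => simp
  | succ r ih =>
    intro s hs
    rw [List.range'_succ, List.map_cons, ih (s+1) (by omega)]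
    rw [List.drop_eq_getElem_cons (show s < cs.length by omega), List.take_succ_cons,
        List.getD_eq_getElem cs ' ' (show s < cs.length by omega)]

-- ----- A side -----

def pvFlush (o : Option (List Int)) : List (List Int) :=
  match o with | none => [] | some t => [t]

def pvFin (st : List (List Int) × Option (List Int)) : List (List Int) := st.1 ++ pvFlush st.2

def pvStepA (m : Nat) (cs : List Char) (st : List (List Int) × Option (List Int)) (j : Nat) :
    List (List Int) × Option (List Int) :=
  if m ∣ j then (st.1 ++ pvFlush st.2, some [pvV (cs.getD j ' ')])
  else (st.1, st.2.map (fun t => t ++ [pvV (cs.getD j ' ')]))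

theorem pvFoldA_inner (m : Nat) (cs : List Char) :
    ∀ (js : List Nat) (done : List (List Int)) (t : List Int), (∀ j ∈ js, ¬ m ∣ j) →
    js.foldl (pvStepA m cs) (done, some t)
      = (done, some (t ++ js.map (fun j => pvV (cs.getD j ' ')))) := by
  intro js
  induction js with
  | nil => simp
  | cons j js ih =>
    intro done t h
    simp only [List.foldl_cons, List.map_cons]
    rw [pvStepA, if_neg (h j (by simp))]
    simpa using ih done (t ++ [pvV (cs.getD j ' ')]) (fun x hx => h x (by simp [hx]))

theorem pvFoldA_main (m : Nat) (hm : 0 < m) (cs : List Char) :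
    ∀ (fuel s : Nat), cs.length - s ≤ fuel → m ∣ s →
    ∀ (done : List (List Int)) (cur : Option (List Int)),
    pvFin ((List.range' s (cs.length - s)).foldl (pvStepA m cs) (done, cur))
      = done ++ pvFlush cur ++ pvChunks m ((cs.drop s).map pvV) := by
  intro fuel
  induction fuel with
  | zero =>
    intro s hf hs done cur
    have : cs.length - s = 0 := by omega
    simp [this, List.drop_of_length_le (by omega : cs.length ≤ s), pvFin]
  | succ fuel ih =>
    intro s hf hs done cur
    by_cases hlt : s < cs.length
    case neg =>
      have : cs.length - s = 0 := by omega
      simp [this, List.drop_of_length_le (by omega : cs.length ≤ s), pvFin]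
    case pos =>
      set r := min m (cs.length - s) with hr
      have hr1 : 0 < r := by omega
      have hcons : ∀ (a n : Nat), 0 < n → List.range' a n = a :: List.range' (a+1) (n-1) := by
        intro a n hn
        obtain ⟨n', rfl⟩ := Nat.exists_eq_succ_of_ne_zero (Nat.pos_iff_ne_zero.mp hn)
        simp [List.range'_succ]
      have hsplit : List.range' s (cs.length - s)
          = (s :: List.range' (s+1) (r-1)) ++ List.range' (s + r) (cs.length - s - r) := by
        have happ := List.range'_append (s := s) (m := r) (n := cs.length - s - r) (step := 1)
        rw [Nat.one_mul] at happ
        rw [show cs.length - s = r + (cs.length - s - r) by omega, ← happ, hcons s r hr1,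
            Nat.add_sub_cancel_left]
      rw [hsplit, List.foldl_append, List.foldl_cons]
      rw [pvStepA, if_pos hs]
      rw [pvFoldA_inner m cs _ _ _ ?nodvd]
      case nodvd =>
        intro j hj hdvd
        rw [List.mem_range'_1] at hj
        have h2 : m ∣ j - s := Nat.dvd_sub hdvd hs
        have h3 := Nat.le_of_dvd (by omega) h2
        omega
      have hvals : pvV (cs.getD s ' ') :: (List.range' (s+1) (r-1)).map (fun j => pvV (cs.getD j ' '))
          = ((cs.drop s).take r).map pvV := by
        have h1 : (List.range' s r).map (fun j => cs.getD j ' ') = (cs.drop s).take r :=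
          pvMapGetD cs r s (by omega)
        rw [hcons s r hr1] at h1
        have h3 := congrArg (List.map pvV) h1
        simpa [List.map_map, Function.comp] using h3
      by_cases hbig : s + m < cs.length
      case pos =>
        have hrm : r = m := by omega
        simp only [hrm] at hvals
        simp only [hrm, List.singleton_append, hvals]
        rw [show cs.length - s - m = cs.length - (s + m) by omega]
        rw [ih (s + m) (by omega) (Dvd.dvd.add hs dvd_rfl)
          (done ++ pvFlush cur) (some (((cs.drop s).take m).map pvV))]
        rw [pvChunks_cons m hm ((cs.drop s).map pvV) (by simp; omega)]
        simp [pvFlush, List.map_take, List.map_drop, List.drop_drop, Nat.add_comm]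
      case neg =>
        have hrend : r = cs.length - s := by omega
        have hempty : cs.length - s - r = 0 := by omega
        simp only [hempty, List.range'_zero, List.foldl_nil, List.singleton_append, hvals]
        rw [pvChunks_short m hm ((cs.drop s).map pvV) (by simp; omega) (by simp; omega)]
        simp [pvFin, pvFlush, hrend,
          List.take_of_length_le (by simp : ((cs.drop s).length ≤ cs.length - s))]

-- ----- B side -----

theorem pvFoldB_main (m : Nat) (hm : 0 < m) (cs : List Char) :
    ∀ (fuel s : Nat), cs.length - s ≤ fuel →
    (PySem.List.pyRange (s : Int) (cs.length : Int) (m : Int)).map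
        (fun i => (PySem.List.slice cs (some i) (some (i + (m : Int)))).map pvConvB)
      = pvChunks m ((cs.drop s).map pvV) := by
  intro fuel
  induction fuel with
  | zero =>
    intro s hf
    have hle : cs.length ≤ s := by omega
    rw [pvPyRange_pos_nil _ _ _ (by exact_mod_cast hle) (by exact_mod_cast hm)]
    simp [List.drop_of_length_le hle]
  | succ fuel ih =>
    intro s hf
    by_cases hlt : s < cs.length
    case neg =>
      have hle : cs.length ≤ s := by omega
      rw [pvPyRange_pos_nil _ _ _ (by exact_mod_cast hle) (by exact_mod_cast hm)]
      simp [List.drop_of_length_le hle]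
    case pos =>
      rw [pvPyRange_pos_cons _ _ _ (by exact_mod_cast hlt) (by exact_mod_cast hm)]
      rw [List.map_cons, PySem.List.slice_natCast_add cs s m]
      have hcast : ((s : Int) + (m : Int)) = ((s + m : Nat) : Int) := by push_cast; ring
      rw [hcast, ih (s + m) (by omega)]
      rw [pvChunks_cons m hm ((cs.drop s).map pvV) (by simp; omega)]
      congr 1
      · rw [List.map_take]; exact congrArg (List.take m) (List.map_congr_left (fun c _ => pvConvB_eq c))
      · congr 1
        simp [List.map_drop, List.drop_drop, Nat.add_comm]

-- bridge: the Int-indexed loop body of port A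
def pvStepInt (l : Int) (cs : List Char)
    (st : List (List Int) × Option (List Int)) (i : Int) :
    List (List Int) × Option (List Int) :=
  let v := (pvCheckA (PySem.List.pyGetD cs i ' ')).1
  if PySem.Int.mod i l = 0 then
    (st.1 ++ (match st.2 with | none => [] | some t => [t]), some [v])
  else
    (st.1, st.2.map (fun t => t ++ [v]))

theorem pvKMtrx_eq_fin (k : String) (l : Int) :
    kMtrx k l
      = pvFin ((PySem.List.pyRange 0 (PySem.Str.len k) 1).foldl (pvStepInt l k.toList) ([], none)) := rfl

theorem pvStepInt_eq_stepA (l : Int) (cs : List Char)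
    (st : List (List Int) × Option (List Int)) (j : Nat) :
    pvStepInt l cs st (j : Int) = pvStepA l.natAbs cs st j := by
  simp only [pvStepInt, pvStepA, pvV, pvFlush, PySem.List.pyGetD_natCast]
  have hmod : (PySem.Int.mod (j : Int) l = 0) ↔ (l.natAbs ∣ j) := by
    rw [PySem.Int.mod_eq_zero_iff_dvd]
    constructor
    · intro h
      have h2 : (l.natAbs : Int) ∣ (j : Int) := (Int.natAbs_dvd).mpr h
      exact_mod_cast h2
    · intro h
      have h2 : (l.natAbs : Int) ∣ (j : Int) := by exact_mod_cast h
      exact (Int.natAbs_dvd).mp h2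
  by_cases hd : l.natAbs ∣ j
  · rw [if_pos (hmod.mpr hd), if_pos hd]
  · rw [if_neg (fun hc => hd (hmod.mp hc)), if_neg hd]

theorem pvFold_int_nat (l : Int) (cs : List Char) :
    ∀ (js : List Nat) (st : List (List Int) × Option (List Int)),
    (List.map (fun (j : Nat) => (j : Int)) js).foldl (pvStepInt l cs) st
      = js.foldl (pvStepA l.natAbs cs) st := by
  intro js
  induction js with
  | nil => intro st; rfl
  | cons j js ih =>
    intro st
    simp only [List.map_cons, List.foldl_cons, ih, pvStepInt_eq_stepA l cs st j]

-- ===== VERDICT (by name: the statement is the Claim_ definition above) =====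
theorem pvPyRange_empty (l : Int) (h : l ≠ 0) : PySem.List.pyRange 0 0 l = [] := by
  unfold PySem.List.pyRange
  split_ifs <;> simp_all

theorem kMtrx_spec : Claim_equal_kMtrx := by
  intro k l _hdom hpre
  obtain ⟨_halnum, hl | ⟨hnil, hlz⟩⟩ := hpre
  case inr =>
    unfold Spec_kMtrx kMtrx kMtrx_alt
    simp [PySem.Str.len_eq, hnil, pvPyRange_empty l hlz]
  unfold Spec_kMtrx
  set cs := k.toList with hcs
  set m := l.natAbs with hmdef
  have hm : 0 < m := by omega
  have hml : (m : Int) = l := by omega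
  -- B side
  unfold kMtrx_alt
  simp only [PySem.Str.len_eq, ← hcs, ← hml]
  have hB := pvFoldB_main m hm cs cs.length 0 (by omega)
  simp only [Nat.cast_zero, List.drop_zero] at hB
  rw [hB]
  -- A side
  rw [pvKMtrx_eq_fin, PySem.Str.len_eq, ← hcs, PySem.List.pyRange_zero_nat,
      pvFold_int_nat ((m : Int)) cs]
  simp only [Int.natAbs_natCast]
  have hA := pvFoldA_main m hm cs cs.length 0 (by omega) (dvd_zero m) [] none
  rw [List.range_eq_range']
  simpa [pvFlush] using hA
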